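-- pv_equiv track=rewrite | github.com/raf-xtgt/paper-plane | backend/app/service/agents/navigator/navigator_web_crawler_v2.py | _generate_contact_markdown
-- ===== SOURCE A (Python) =====
-- from typing import List, Optional, Dict, Any, Tuple
--
-- def _generate_contact_markdown(
--
--     all_contacts: List[Dict[str, Any]],
--     entity_name: str,
--     website_url: str
-- ) -> str:
--     """
--     Generate structured markdown following the specified schema.
--
--     Schema:
--     decision_maker("Name tied to a phone or email or social media handle")
--     contact_info: ("Contact information - WhatsApp number, email, etc.")
--     contact_channel: ("WhatsApp", "Email", "Messenger", "Instagram", "PhoneNo", "Others")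
--
--     Args:
--         all_contacts: List of all extracted contact information
--         entity_name: Name of the entity
--         website_url: Website URL
--
--     Returns:
--         Structured markdown with all contact information
--     """
--     markdown_sections = []
--
--     # Add header
--     markdown_sections.append(f"# Contact Information for {entity_name}")
--     markdown_sections.append(f"Website: {website_url}")
--     markdown_sections.append("")
--
--     if not all_contacts:
--         markdown_sections.append("No contact information found.")
--         return "\n".join(markdown_sections)
--
--     # Group contacts by type for better organization
--     contacts_by_type = {}
--     for contact in all_contacts:
--         channel = contact.get("contact_channel", "Others")
--         if channel not in contacts_by_type:
--             contacts_by_type[channel] = []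
--         contacts_by_type[channel].append(contact)
--
--     # Add contact sections
--     for channel, contacts in contacts_by_type.items():
--         markdown_sections.append(f"## {channel} Contacts")
--
--         for contact in contacts:
--             decision_maker = contact.get("decision_maker") or "Unknown"
--             contact_info = contact.get("contact_info", "")
--
--             markdown_sections.append(f"- **Decision Maker:** {decision_maker}")
--             markdown_sections.append(f"  - **Contact Info:** {contact_info}")
--             markdown_sections.append(f"  - **Contact Channel:** {channel}")
--             markdown_sections.append("")
--
--     return "\n".join(markdown_sections)
-- ===== SOURCE B (Python) =====
-- def _generate_contact_markdown(all_contacts, entity_name, website_url):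
--     lines = [
--         f"# Contact Information for {entity_name}",
--         f"Website: {website_url}",
--         "",
--     ]
--     if not all_contacts:
--         return "\n".join(lines + ["No contact information found."])
--
--     def channel_of(contact):
--         return contact.get("contact_channel", "Others")
--
--     # Distinct channels in first-appearance order, then one filtered scan per channel.
--     channels = list(dict.fromkeys(channel_of(c) for c in all_contacts))
--     lines += [
--         line
--         for ch in channels
--         for line in [f"## {ch} Contacts"] + [
--             entry_line
--             for c in all_contacts
--             if channel_of(c) == ch
--             for entry_line in [
--                 f"- **Decision Maker:** {c.get('decision_maker') or 'Unknown'}",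
--                 f"  - **Contact Info:** {c.get('contact_info', '')}",
--                 f"  - **Contact Channel:** {ch}",
--                 "",
--             ]
--         ]
--     ]
--     return "\n".join(lines)
-- ===== Notes on version B (the rewrite author's own statement) =====
-- stated objective: alternative
-- what changed: Replaced A's dict-of-lists grouping pass followed by iteration over the grouped buckets with an ordered-distinct-channels index (dict.fromkeys) plus one filtered scan of the full contact list per channel, built as a nested comprehension.
import Mathlib
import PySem

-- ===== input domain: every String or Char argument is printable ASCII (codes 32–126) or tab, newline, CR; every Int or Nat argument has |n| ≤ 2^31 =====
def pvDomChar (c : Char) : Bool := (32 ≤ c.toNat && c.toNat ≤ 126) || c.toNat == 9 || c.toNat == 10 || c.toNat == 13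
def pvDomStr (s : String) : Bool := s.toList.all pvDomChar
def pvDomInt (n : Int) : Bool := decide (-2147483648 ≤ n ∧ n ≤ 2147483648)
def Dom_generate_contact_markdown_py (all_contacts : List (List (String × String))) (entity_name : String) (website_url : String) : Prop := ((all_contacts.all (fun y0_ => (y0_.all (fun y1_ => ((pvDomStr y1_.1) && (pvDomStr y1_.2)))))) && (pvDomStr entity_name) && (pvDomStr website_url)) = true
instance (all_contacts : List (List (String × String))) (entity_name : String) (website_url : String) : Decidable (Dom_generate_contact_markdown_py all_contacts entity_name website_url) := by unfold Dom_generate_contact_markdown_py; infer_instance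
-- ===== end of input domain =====

-- ===== PORT A =====
-- B replaces A's dict-of-lists grouping pass with an ordered distinct-channel index
-- plus one filtered scan per channel (alternative decomposition, same output).
def generate_contact_markdown_py (all_contacts : List (List (String × String))) (entity_name : String) (website_url : String) : String :=
  -- markdown_sections = [header lines]
  let markdown_sections : List String :=
    ["# Contact Information for " ++ entity_name, "Website: " ++ website_url, ""]
  if all_contacts.isEmpty then
    PySem.Str.join "\n" (markdown_sections ++ ["No contact information found."])
  else
    -- group contacts by channel (dict of lists, insertion order)
    let contacts_by_type : PySem.Dict String (List (List (String × String))) :=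
      all_contacts.foldl (fun d contact =>
        let channel := (PySem.Dict.ofList contact).getD "contact_channel" "Others"
        let d := if d.contains channel then d else d.insert channel []
        d.modify channel [] (fun l => l ++ [contact])) PySem.Dict.empty
    -- for channel, contacts in contacts_by_type.items(): …
    let markdown_sections := contacts_by_type.items.foldl (fun ms p =>
      (p.2.foldl (fun ms contact =>
        -- contact.get("decision_maker") or "Unknown": missing or "" both give "Unknown"
        let dm := (PySem.Dict.ofList contact).getD "decision_maker" ""
        let decision_maker := if dm = "" then "Unknown" else dm
        let contact_info := (PySem.Dict.ofList contact).getD "contact_info" ""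
        ms ++ ["- **Decision Maker:** " ++ decision_maker,
               "  - **Contact Info:** " ++ contact_info,
               "  - **Contact Channel:** " ++ p.1, ""])
        (ms ++ ["## " ++ p.1 ++ " Contacts"]))) markdown_sections
    PySem.Str.join "\n" markdown_sections

-- ===== PORT B =====
def generate_contact_markdown_py_alt (all_contacts : List (List (String × String))) (entity_name : String) (website_url : String) : String :=
  let lines : List String :=
    ["# Contact Information for " ++ entity_name, "Website: " ++ website_url, ""]
  if all_contacts.isEmpty then
    PySem.Str.join "\n" (lines ++ ["No contact information found."])
  else
    -- channels = list(dict.fromkeys(channel_of(c) for c in all_contacts))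
    let channels :=
      PySem.List.dedup (all_contacts.map (fun c => (PySem.Dict.ofList c).getD "contact_channel" "Others"))
    let lines := lines ++ channels.flatMap (fun ch =>
      ("## " ++ ch ++ " Contacts") ::
        (all_contacts.filter
            (fun c => (PySem.Dict.ofList c).getD "contact_channel" "Others" == ch)).flatMap
          (fun c =>
            let dm := (PySem.Dict.ofList c).getD "decision_maker" ""
            ["- **Decision Maker:** " ++ (if dm = "" then "Unknown" else dm),
             "  - **Contact Info:** " ++ (PySem.Dict.ofList c).getD "contact_info" "",
             "  - **Contact Channel:** " ++ ch, ""]))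
    PySem.Str.join "\n" lines

-- ===== PRECONDITION & SPEC =====
def Spec_generate_contact_markdown_py (all_contacts : List (List (String × String))) (entity_name : String) (website_url : String) (out : String) : Prop := out = generate_contact_markdown_py_alt all_contacts entity_name website_url
instance (all_contacts : List (List (String × String))) (entity_name : String) (website_url : String) (out : String) : Decidable (Spec_generate_contact_markdown_py all_contacts entity_name website_url out) := by unfold Spec_generate_contact_markdown_py; infer_instance

-- ===== CLAIM (what is proved, stated in full; the proofs are below) =====
def Claim_equal_generate_contact_markdown_py : Prop := ∀ (all_contacts : List (List (String × String))) (entity_name : String) (website_url : String), Dom_generate_contact_markdown_py all_contacts entity_name website_url → Spec_generate_contact_markdown_py all_contacts entity_name website_url (generate_contact_markdown_py all_contacts entity_name website_url)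

-- ===== LEMMAS AND PROOFS =====

-- the channel key of a contact
def pvKey (c : List (String × String)) : String :=
  (PySem.Dict.ofList c).getD "contact_channel" "Others"

-- the four markdown lines of one contact, with its channel heading string
def pvEntry (ch : String) (c : List (String × String)) : List String :=
  let dm := (PySem.Dict.ofList c).getD "decision_maker" ""
  ["- **Decision Maker:** " ++ (if dm = "" then "Unknown" else dm),
   "  - **Contact Info:** " ++ (PySem.Dict.ofList c).getD "contact_info" "",
   "  - **Contact Channel:** " ++ ch, ""]

-- A's grouping step (the conditional insert of [] followed by modify) is the plain modify step
lemma pvStep_eq (d : PySem.Dict String (List (List (String × String)))) (c : List (String × String)) :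
    (let channel := pvKey c
     let d' := if d.contains channel then d else d.insert channel []
     d'.modify channel [] (fun l => l ++ [c]))
    = d.modify (pvKey c) [] (fun l => l ++ [c]) := by
  by_cases h : d.contains (pvKey c)
  · simp [h]
  · simp only [h]
    -- modify is d.insert k (f (d.getD k dflt)) definitionally
    show (d.insert (pvKey c) []).insert (pvKey c) (((d.insert (pvKey c) []).getD (pvKey c) []) ++ [c])
        = d.insert (pvKey c) ((d.getD (pvKey c) []) ++ [c])
    rw [PySem.Dict.getD_insert_self, PySem.Dict.insert_insert_self,
        PySem.Dict.getD_of_not_contains _ _ (by simpa using h)]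

-- the grouping dict, after pvStep_eq, in closed form: its items are the
-- distinct channels in order, each with the filtered contact list
lemma pvItems_group (l : List (List (String × String))) :
    (l.foldl (fun d c => d.modify (pvKey c) [] (fun g => g ++ [c])) PySem.Dict.empty).items
    = (PySem.List.dedup (l.map pvKey)).map
        (fun ch => (ch, l.filter (fun c => pvKey c == ch))) := by
  set D := l.foldl (fun d c => d.modify (pvKey c) [] (fun g => g ++ [c])) PySem.Dict.empty with hD
  have hkeys : D.keys = PySem.List.dedup (l.map pvKey) := by
    rw [hD, PySem.Dict.keys_foldl_modify_key]
    simp [PySem.Dict.keys_empty, PySem.Set.update_nil_left, PySem.List.dedup_eq_ofList]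
  have hnd : D.keys.Nodup := by
    rw [hD]; exact PySem.Dict.nodup_keys_foldl_modify_key l pvKey [] _ _ PySem.Dict.nodup_keys_empty
  have hget : ∀ ch, D.getD ch [] = l.filter (fun c => pvKey c == ch) := by
    intro ch
    have hfold : D = (l.map (fun c => (pvKey c, c))).foldl
        (fun d p => d.modify p.1 [] (fun g => g ++ [p.2])) PySem.Dict.empty := by
      rw [hD, List.foldl_map]
    rw [hfold, PySem.Dict.getD_foldl_modify_append]
    simp [PySem.Dict.getD_empty, List.filter_map, Function.comp_def]
  rw [PySem.Dict.items_eq_map_keys D hnd [], hkeys]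
  exact List.map_congr_left (fun ch _ => by rw [hget ch])

-- A's inner per-bucket loop appends the entries of the bucket
lemma pvInnerA (ch : String) (contacts : List (List (String × String))) (ms : List String) :
    contacts.foldl (fun ms contact =>
        let dm := (PySem.Dict.ofList contact).getD "decision_maker" ""
        let decision_maker := if dm = "" then "Unknown" else dm
        let contact_info := (PySem.Dict.ofList contact).getD "contact_info" ""
        ms ++ ["- **Decision Maker:** " ++ decision_maker,
               "  - **Contact Info:** " ++ contact_info,
               "  - **Contact Channel:** " ++ ch, ""]) ms
    = ms ++ contacts.flatMap (pvEntry ch) := by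
  induction contacts generalizing ms with
  | nil => simp
  | cons c t ih => rw [List.foldl_cons, ih]; simp [pvEntry, List.append_assoc]

-- A's outer loop over the grouped items appends one section per item
lemma pvOuterA (items : List (String × List (List (String × String)))) (ms : List String) :
    items.foldl (fun ms p =>
      (p.2.foldl (fun ms contact =>
        let dm := (PySem.Dict.ofList contact).getD "decision_maker" ""
        let decision_maker := if dm = "" then "Unknown" else dm
        let contact_info := (PySem.Dict.ofList contact).getD "contact_info" ""
        ms ++ ["- **Decision Maker:** " ++ decision_maker,
               "  - **Contact Info:** " ++ contact_info,
               "  - **Contact Channel:** " ++ p.1, ""])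
        (ms ++ ["## " ++ p.1 ++ " Contacts"]))) ms
    = ms ++ items.flatMap (fun p =>
        ("## " ++ p.1 ++ " Contacts") :: p.2.flatMap (pvEntry p.1)) := by
  have h : (fun (ms : List String) (p : String × List (List (String × String))) =>
      (p.2.foldl (fun ms contact =>
        let dm := (PySem.Dict.ofList contact).getD "decision_maker" ""
        let decision_maker := if dm = "" then "Unknown" else dm
        let contact_info := (PySem.Dict.ofList contact).getD "contact_info" ""
        ms ++ ["- **Decision Maker:** " ++ decision_maker,
               "  - **Contact Info:** " ++ contact_info,
               "  - **Contact Channel:** " ++ p.1, ""])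
        (ms ++ ["## " ++ p.1 ++ " Contacts"])))
      = fun ms p => ms ++ (("## " ++ p.1 ++ " Contacts") :: p.2.flatMap (pvEntry p.1)) := by
    funext ms p
    rw [pvInnerA p.1 p.2]
    simp
  rw [h, PySem.List.foldl_append_eq_flatMap]

-- ===== VERDICT (by name: the statement is the Claim_ definition above) =====
theorem generate_contact_markdown_py_spec : Claim_equal_generate_contact_markdown_py := by
  intro all_contacts entity_name website_url _
  unfold Spec_generate_contact_markdown_py generate_contact_markdown_py generate_contact_markdown_py_alt
  by_cases he : all_contacts.isEmpty
  · simp only [he, if_true]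
  · simp only [he]
    have hstep : all_contacts.foldl (fun d contact =>
        let channel := (PySem.Dict.ofList contact).getD "contact_channel" "Others"
        let d' := if d.contains channel then d else d.insert channel []
        d'.modify channel [] (fun l => l ++ [contact])) PySem.Dict.empty
        = all_contacts.foldl (fun d c => d.modify (pvKey c) [] (fun g => g ++ [c])) PySem.Dict.empty := by
      have hf : (fun (d : PySem.Dict String (List (List (String × String)))) contact =>
          let channel := (PySem.Dict.ofList contact).getD "contact_channel" "Others"
          let d' := if d.contains channel then d else d.insert channel []
          d'.modify channel [] (fun l => l ++ [contact]))
          = fun d c => d.modify (pvKey c) [] (fun g => g ++ [c]) :=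
        funext fun d => funext fun c => pvStep_eq d c
      rw [hf]
    rw [hstep, pvOuterA, pvItems_group, List.flatMap_map]
    rfl
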